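-- pv_equiv track=rewrite | github.com/Contingencyplana/storybook_fun_factory | game_construction_bay/high_command/s1_1_the_voice_that_guides_the_recursion_forward/s1_1_the_orders_that_mark_the_lines_of_thought/s7_4_it_updates_the_dispatch_to_track_these_paths.py | update_dispatch_targets
-- ===== SOURCE A (Python) =====
-- from typing import Dict, List
--
-- def update_dispatch_targets(
--     classified_zone_map: Dict[str, str],
--     current_dispatch_targets: List[str]
-- ) -> List[str]:
--     """
--     Updates dispatch targets based on the classified zone map.
--
--     Parameters:
--         classified_zone_map (dict): Maps zone paths to classifications (e.g., 'creative', 'failing', 'stalled').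
--         current_dispatch_targets (list): Current list of dispatch target paths.
--
--     Returns:
--         list: Updated list of dispatch targets, sorted with priority zones first.
--     """
--     priority_order = ['failing', 'testing', 'creative', 'stalled']
--     bucketed = {status: [] for status in priority_order}
--
--     for zone, status in classified_zone_map.items():
--         if status in bucketed:
--             bucketed[status].append(zone)
--
--     # Prioritize by classification and append any previously active targets not seen
--     updated_targets = []
--     for status in priority_order:
--         updated_targets.extend(bucketed[status])
--
--     unseen = [z for z in current_dispatch_targets if z not in updated_targets]
--     updated_targets.extend(unseen)
--
--     return updated_targets
-- ===== SOURCE B (Python) =====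
-- def update_dispatch_targets(classified_zone_map, current_dispatch_targets):
--     priority_order = ['failing', 'testing', 'creative', 'stalled']
--     prioritized = [zone for status in priority_order
--                    for zone, s in classified_zone_map.items() if s == status]
--     return prioritized + [t for t in current_dispatch_targets if t not in prioritized]
-- ===== Notes on version B (the rewrite author's own statement) =====
-- stated objective: simpler
-- what changed: Replaces the bucket-dict distribution pass (build a dict of lists, then concatenate its entries) with direct per-priority filtering comprehensions and no intermediate dict; unseen current targets are appended as before.
import Mathlib
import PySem

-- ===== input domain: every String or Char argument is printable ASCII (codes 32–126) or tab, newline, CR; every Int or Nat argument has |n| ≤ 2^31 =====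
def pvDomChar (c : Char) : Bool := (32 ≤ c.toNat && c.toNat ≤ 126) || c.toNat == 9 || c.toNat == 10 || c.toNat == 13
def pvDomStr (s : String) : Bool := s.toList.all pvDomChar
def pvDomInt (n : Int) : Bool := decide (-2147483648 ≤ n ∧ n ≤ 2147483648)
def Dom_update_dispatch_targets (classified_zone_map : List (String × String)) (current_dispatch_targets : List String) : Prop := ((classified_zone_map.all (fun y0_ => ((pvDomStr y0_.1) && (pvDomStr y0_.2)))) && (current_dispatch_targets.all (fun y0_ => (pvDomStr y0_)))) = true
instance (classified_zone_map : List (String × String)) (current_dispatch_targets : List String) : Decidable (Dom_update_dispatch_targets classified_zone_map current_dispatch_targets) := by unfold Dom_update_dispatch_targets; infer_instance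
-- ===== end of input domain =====

-- B replaces A's bucket-dict distribution with direct per-priority filtering (no intermediate dict); same return value.

-- ===== PORT A =====
def update_dispatch_targets (classified_zone_map : List (String × String)) (current_dispatch_targets : List String) : List String :=
  let priority_order : List String := ["failing", "testing", "creative", "stalled"]
  let bucketed : PySem.Dict String (List String) :=
    priority_order.foldl (fun d status => d.insert status []) PySem.Dict.empty
  let bucketed : PySem.Dict String (List String) :=
    classified_zone_map.foldl
      (fun d p => if d.contains p.2 then d.modify p.2 [] (fun l => l ++ [p.1]) else d) bucketed
  let updated_targets : List String :=
    priority_order.foldl (fun acc status => acc ++ bucketed.getD status []) []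
  let unseen : List String :=
    current_dispatch_targets.filter (fun z => !(updated_targets.contains z))
  updated_targets ++ unseen

-- ===== PORT B =====
def update_dispatch_targets_alt (classified_zone_map : List (String × String)) (current_dispatch_targets : List String) : List String :=
  let priority_order : List String := ["failing", "testing", "creative", "stalled"]
  let prioritized : List String :=
    priority_order.flatMap (fun status =>
      (classified_zone_map.filter (fun p => p.2 == status)).map (fun p => p.1))
  prioritized ++ current_dispatch_targets.filter (fun t => !(prioritized.contains t))

-- ===== PRECONDITION & SPEC =====
def Spec_update_dispatch_targets (classified_zone_map : List (String × String)) (current_dispatch_targets : List String) (out : List String) : Prop := out = update_dispatch_targets_alt classified_zone_map current_dispatch_targets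
instance (classified_zone_map : List (String × String)) (current_dispatch_targets : List String) (out : List String) : Decidable (Spec_update_dispatch_targets classified_zone_map current_dispatch_targets out) := by unfold Spec_update_dispatch_targets; infer_instance

-- ===== CLAIM (what is proved, stated in full; the proofs are below) =====
def Claim_equal_update_dispatch_targets : Prop := ∀ (classified_zone_map : List (String × String)) (current_dispatch_targets : List String), Dom_update_dispatch_targets classified_zone_map current_dispatch_targets → Spec_update_dispatch_targets classified_zone_map current_dispatch_targets (update_dispatch_targets classified_zone_map current_dispatch_targets)

-- ===== LEMMAS AND PROOFS =====

-- The bucket-filling fold: any key of the initial dict ends up with the zones whose status equals it, in order.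
theorem pv_fold_bucket (l : List (String × String)) (d : PySem.Dict String (List String))
    (hc : ∀ x, d.contains x = (["failing", "testing", "creative", "stalled"] : List String).contains x)
    (s : String) (hs : (["failing", "testing", "creative", "stalled"] : List String).contains s = true) :
    (l.foldl (fun d p => if d.contains p.2 then d.modify p.2 [] (fun l => l ++ [p.1]) else d) d).getD s []
      = d.getD s [] ++ (l.filter (fun p => p.2 == s)).map (fun p => p.1) := by
  induction l generalizing d with
  | nil => simp
  | cons p t ih =>
    simp only [List.foldl_cons, List.filter_cons]
    by_cases hg : d.contains p.2 = true
    · rw [if_pos hg]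
      rw [ih _ (by
        intro x
        rw [PySem.Dict.contains_modify]
        cases hxb : (x == p.2) with
        | true =>
          have hxe : x = p.2 := eq_of_beq hxb
          subst hxe
          simp only [Bool.true_or]
          rw [← hc p.2]
          exact hg.symm
        | false =>
          simp only [Bool.false_or]
          exact hc x)]
      rw [PySem.Dict.getD_modify]
      by_cases hsp : s = p.2
      · subst hsp
        simp [List.append_assoc]
      · rw [if_neg hsp]
        have hps : (p.2 == s) = false := by
          simp only [beq_eq_false_iff_ne]
          exact fun h => hsp h.symm
        simp [hps]
    · rw [if_neg hg, ih _ hc]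
      have hps : (p.2 == s) = false := by
        simp only [beq_eq_false_iff_ne]
        intro h
        rw [h, hc s, hs] at hg
        exact hg rfl
      simp [hps]

theorem update_dispatch_targets_eq_alt (classified_zone_map : List (String × String)) (current_dispatch_targets : List String) :
    update_dispatch_targets classified_zone_map current_dispatch_targets
      = update_dispatch_targets_alt classified_zone_map current_dispatch_targets := by
  unfold update_dispatch_targets update_dispatch_targets_alt
  have hc : ∀ x, (((((PySem.Dict.empty.insert "failing" ([] : List String)).insert "testing" []).insert "creative" []).insert "stalled" [])).contains x
      = (["failing", "testing", "creative", "stalled"] : List String).contains x := by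
    intro x
    simp only [PySem.Dict.contains_insert, PySem.Dict.contains_empty,
      List.contains_cons, List.contains_nil, Bool.or_false]
    cases h1 : x == "failing" <;> cases h2 : x == "testing" <;>
      cases h3 : x == "creative" <;> cases h4 : x == "stalled" <;> simp_all
  have key : ∀ s, (["failing", "testing", "creative", "stalled"] : List String).contains s = true →
      (classified_zone_map.foldl
        (fun d p => if d.contains p.2 then d.modify p.2 [] (fun l => l ++ [p.1]) else d)
        (((((PySem.Dict.empty.insert "failing" ([] : List String)).insert "testing" []).insert "creative" []).insert "stalled" []))).getD s []
      = (classified_zone_map.filter (fun p => p.2 == s)).map (fun p => p.1) := by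
    intro s hs
    rw [pv_fold_bucket _ _ hc s hs]
    have hinit : (((((PySem.Dict.empty.insert "failing" ([] : List String)).insert "testing" []).insert "creative" []).insert "stalled" [])).getD s ([] : List String) = [] := by
      simp only [PySem.Dict.getD_insert]
      split_ifs <;> simp [PySem.Dict.getD_empty]
    rw [hinit]
    simp
  dsimp only
  simp only [List.foldl_cons, List.foldl_nil, List.flatMap_cons, List.flatMap_nil]
  rw [key "failing" (by decide), key "testing" (by decide), key "creative" (by decide),
      key "stalled" (by decide)]
  simp [List.append_assoc]

-- ===== VERDICT (by name: the statement is the Claim_ definition above) =====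
theorem update_dispatch_targets_spec : Claim_equal_update_dispatch_targets := by
  intro m cur _
  unfold Spec_update_dispatch_targets
  exact update_dispatch_targets_eq_alt m cur
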